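-- pv_equiv track=rewrite | github.com/MaxMeta/DiscERN | discern/polymer_tools.py | get_polymer_matches
-- ===== SOURCE A (Python) =====
-- def get_polymer_matches(polymer_dict,mibig_vecs):
--     """
--     searches a dictionary of extracted polymer kmer vectors for bgcs to classify against ref_vecs
--     returns a dictionary:
--     {genome::bgc_name:(score,ref_hit),...}
--     score is len({query_kmers}&{ref_kmers}) for best hit in ref_vecs
--     """
--     top_matches={}
--     for genome in polymer_dict:
--         for bgc in polymer_dict[genome]:
--             best_score=0
--             best_hit="initial"
--             for ref in mibig_vecs:
--                 current_score=len(polymer_dict[genome][bgc]&mibig_vecs[ref])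
--                 if current_score>best_score:
--                     best_score=current_score
--                     best_hit=ref
--             top_matches[genome+"::"+bgc]=(best_score,best_hit)
--     return top_matches
-- ===== SOURCE B (Python) =====
-- def get_polymer_matches(polymer_dict, mibig_vecs):
--     # Inverted index kmer -> positions of refs containing it; per query accumulate
--     # hit counts for only the touched refs, then scan the candidates in ref order.
--     refs = list(mibig_vecs)
--     index = {}
--     for i, rset in enumerate(mibig_vecs.values()):
--         for kmer in rset:
--             index.setdefault(kmer, []).append(i)
--     top_matches = {}
--     for genome, bgcs in polymer_dict.items():
--         for bgc, qset in bgcs.items():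
--             counts = {}
--             for kmer in qset:
--                 for i in index.get(kmer, ()):
--                     counts[i] = counts.get(i, 0) + 1
--             best_score, best_hit = 0, "initial"
--             for i in sorted(counts):
--                 c = counts[i]
--                 if c > best_score:
--                     best_score, best_hit = c, refs[i]
--             top_matches[genome + "::" + bgc] = (best_score, best_hit)
--     return top_matches
-- ===== Notes on version B (the rewrite author's own statement) =====
-- stated objective: faster
-- what changed: B builds an inverted index kmer->ref-positions once and, per query, accumulates per-ref hit counts and scans only the touched refs in sorted position order, instead of A's full set intersection of every query against every reference.
import Mathlib
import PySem

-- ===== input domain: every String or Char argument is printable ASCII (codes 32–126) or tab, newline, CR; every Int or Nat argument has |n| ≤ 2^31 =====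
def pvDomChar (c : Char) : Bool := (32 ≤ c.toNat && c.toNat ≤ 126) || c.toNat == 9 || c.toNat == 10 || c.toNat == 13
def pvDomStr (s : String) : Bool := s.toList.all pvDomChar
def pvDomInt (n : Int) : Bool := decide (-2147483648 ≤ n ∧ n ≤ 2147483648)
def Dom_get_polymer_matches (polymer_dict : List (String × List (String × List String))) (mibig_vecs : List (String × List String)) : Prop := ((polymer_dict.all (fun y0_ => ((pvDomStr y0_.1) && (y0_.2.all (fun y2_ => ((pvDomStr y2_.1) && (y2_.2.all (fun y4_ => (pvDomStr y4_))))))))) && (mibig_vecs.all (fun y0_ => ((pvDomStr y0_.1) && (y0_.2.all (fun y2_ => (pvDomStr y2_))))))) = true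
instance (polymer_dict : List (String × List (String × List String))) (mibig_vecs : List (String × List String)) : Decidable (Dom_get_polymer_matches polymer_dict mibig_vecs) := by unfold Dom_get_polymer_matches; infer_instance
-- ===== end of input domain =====

-- B replaces A's per-(query,ref) set intersections by an inverted index kmer→ref positions
-- with accumulated per-ref hit counts per query, scanning only the touched refs (objective: faster).

-- ===== PORT A =====
-- literal transliteration of A: for each genome/bgc, scan all refs, score = len(qset & refset),
-- keep the first strictly-best ref; top_matches is a Python dict (PySem.Dict), returned as items.
def get_polymer_matches (polymer_dict : List (String × List (String × List String))) (mibig_vecs : List (String × List String)) : List (String × Int × String) :=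
  (polymer_dict.foldl (fun tm genome =>
      genome.2.foldl (fun tm bgc =>
        let best := mibig_vecs.foldl (fun best ref =>
            let current_score := PySem.Set.len (PySem.Set.inter bgc.2 ref.2)
            if current_score > best.1 then (current_score, ref.1) else best)
          ((0 : Int), "initial")
        tm.insert (genome.1 ++ "::" ++ bgc.1) best) tm)
    (PySem.Dict.empty : PySem.Dict String (Int × String))).items

-- ===== PORT B =====
-- B-side helper: index = {}; for i, rset in enumerate(mibig_vecs.values()): for kmer in rset: index.setdefault(kmer, []).append(i)
def pvIndex (mibig_vecs : List (String × List String)) : PySem.Dict String (List Int) :=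
  (PySem.List.enumerate mibig_vecs).foldl (fun d p =>
      p.2.2.foldl (fun d kmer => d.modify kmer [] (· ++ [p.1])) d)
    PySem.Dict.empty

-- B-side helper: counts = {}; for kmer in qset: for i in index.get(kmer, ()): counts[i] = counts.get(i, 0) + 1
def pvCounts (index : PySem.Dict String (List Int)) (qset : List String) : PySem.Dict Int Int :=
  qset.foldl (fun c kmer =>
      (index.getD kmer []).foldl (fun c i => c.modify i 0 (· + 1)) c)
    PySem.Dict.empty

-- B-side helper: the candidate scan 'for i in sorted(counts): …'.
-- refs[i] is always in range (i comes from enumerate), so the pyGetD default is never used.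
def pvBest (refs : List String) (counts : PySem.Dict Int Int) : Int × String :=
  (PySem.List.sorted counts.keys (fun i => i)).foldl (fun best i =>
      let c := counts.getD i 0
      if c > best.1 then (c, PySem.List.pyGetD refs i "") else best)
    ((0 : Int), "initial")

-- literal transliteration of B (Source B)
def get_polymer_matches_alt (polymer_dict : List (String × List (String × List String))) (mibig_vecs : List (String × List String)) : List (String × Int × String) :=
  let refs := mibig_vecs.map (·.1)
  let index := pvIndex mibig_vecs
  (polymer_dict.foldl (fun tm genome =>
      genome.2.foldl (fun tm bgc =>
        tm.insert (genome.1 ++ "::" ++ bgc.1) (pvBest refs (pvCounts index bgc.2))) tm)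
    (PySem.Dict.empty : PySem.Dict String (Int × String))).items

-- ===== PRECONDITION & SPEC =====
-- Pre_ only demands that the association lists really represent Python dicts and sets:
-- key lists duplicate-free at both dict levels and every kmer-set list duplicate-free.
-- Lists with duplicate keys/elements do not correspond to any Python input of A.
def Pre_get_polymer_matches (polymer_dict : List (String × List (String × List String))) (mibig_vecs : List (String × List String)) : Prop :=
  (polymer_dict.map (·.1)).Nodup ∧
  (∀ g ∈ polymer_dict, (g.2.map (·.1)).Nodup ∧ ∀ b ∈ g.2, b.2.Nodup) ∧
  (mibig_vecs.map (·.1)).Nodup ∧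
  (∀ r ∈ mibig_vecs, r.2.Nodup)
instance (polymer_dict : List (String × List (String × List String))) (mibig_vecs : List (String × List String)) : Decidable (Pre_get_polymer_matches polymer_dict mibig_vecs) := by unfold Pre_get_polymer_matches; infer_instance

def pvWitness_get_polymer_matches : (List (String × List (String × List String))) × (List (String × List String)) :=
  ([("g", [("b", ["x", "y"])])], [("r1", ["y", "z"]), ("r2", ["x", "y"])])

def Spec_get_polymer_matches (polymer_dict : List (String × List (String × List String))) (mibig_vecs : List (String × List String)) (out : List (String × Int × String)) : Prop := out = get_polymer_matches_alt polymer_dict mibig_vecs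
instance (polymer_dict : List (String × List (String × List String))) (mibig_vecs : List (String × List String)) (out : List (String × Int × String)) : Decidable (Spec_get_polymer_matches polymer_dict mibig_vecs out) := by unfold Spec_get_polymer_matches; infer_instance

-- ===== CLAIM (what is proved, stated in full; the proofs are below) =====
def Claim_equal_get_polymer_matches : Prop := ∀ (polymer_dict : List (String × List (String × List String))) (mibig_vecs : List (String × List String)), Dom_get_polymer_matches polymer_dict mibig_vecs → Pre_get_polymer_matches polymer_dict mibig_vecs → Spec_get_polymer_matches polymer_dict mibig_vecs (get_polymer_matches polymer_dict mibig_vecs)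

-- ===== LEMMAS AND PROOFS =====

-- A's score for a query set against one ref set, in countP form
def pvScore (qset rset : List String) : Int := (qset.countP rset.contains : Int)

theorem pv_len_inter (qset rset : List String) :
    PySem.Set.len (PySem.Set.inter qset rset) = pvScore qset rset := by
  simp only [PySem.Set.len, PySem.Set.inter, pvScore]
  rw [← List.countP_eq_length_filter]
  rfl

theorem pv_score_nonneg (qset rset : List String) : 0 ≤ pvScore qset rset := by
  exact Int.natCast_nonneg _

theorem pv_score_eq_zero (qset rset : List String)
    (h : qset.any rset.contains = false) : pvScore qset rset = 0 := by
  unfold pvScore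
  have : qset.countP rset.contains = 0 := by
    rw [List.countP_eq_zero]
    intro a ha
    exact (List.any_eq_false.mp h) a ha
  simp [this]

-- one ref's kmer set pushed into the index appends that ref's tag to index[k] once per occurrence of k
theorem pv_idx_step (rset : List String) (tag : Int) (d : PySem.Dict String (List Int)) (k : String) :
    (rset.foldl (fun d kmer => d.modify kmer [] (· ++ [tag])) d).getD k []
      = d.getD k [] ++ List.replicate (rset.count k) tag := by
  induction rset generalizing d with
  | nil => simp
  | cons x t ih =>
    simp only [List.foldl_cons, ih, PySem.Dict.getD_modify, List.count_cons]
    by_cases hx : k = x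
    · subst hx
      simp only [if_true, beq_self_eq_true, List.append_assoc, List.singleton_append]
      rw [← List.replicate_succ]
    · have hx' : ¬ x = k := fun h => hx h.symm
      simp [hx, hx']

-- the whole inverted index: index[k] = concatenation over enumerated refs of
-- (count of k in that ref's set) copies of the ref's position
theorem pv_idx_getD (l : List (Int × (String × List String))) (k : String) :
    ∀ d : PySem.Dict String (List Int),
      (l.foldl (fun d p => p.2.2.foldl (fun d kmer => d.modify kmer [] (· ++ [p.1])) d) d).getD k []
        = d.getD k [] ++ l.flatMap (fun p => List.replicate (p.2.2.count k) p.1) := by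
  induction l with
  | nil => simp
  | cons r t ih =>
    intro d
    rw [List.foldl_cons, ih, pv_idx_step, List.flatMap_cons, List.append_assoc]

-- counting one position's occurrences in the concatenated replicates (positions strictly increase)
theorem pv_flat_count (k : String) :
    ∀ l : List (Int × (String × List String)), l.Pairwise (fun a b => a.1 < b.1) →
      ∀ p ∈ l, p.2.2.Nodup →
      (l.flatMap (fun r => List.replicate (r.2.2.count k) r.1)).count p.1
        = if p.2.2.contains k then 1 else 0 := by
  intro l
  induction l with
  | nil => intro _ p hmem; cases hmem
  | cons r t ih =>
    intro hpw p hmem hnd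
    have hpw' := (List.pairwise_cons.mp hpw).2
    have hlt : ∀ b ∈ t, r.1 < b.1 := (List.pairwise_cons.mp hpw).1
    simp only [List.flatMap_cons, List.count_append, List.count_replicate]
    rcases List.mem_cons.mp hmem with h | h
    · subst h
      have hz : (t.flatMap (fun r => List.replicate (r.2.2.count k) r.1)).count p.1 = 0 := by
        apply List.count_eq_zero_of_not_mem
        intro hmem'
        rcases List.mem_flatMap.mp hmem' with ⟨r', hr', hrep⟩
        exact absurd ((List.eq_of_mem_replicate hrep).symm ▸ hlt r' hr') (lt_irrefl p.1)
      rw [hz]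
      by_cases hkm : k ∈ p.2.2
      · simp [List.count_eq_one_of_mem hnd hkm, hkm]
      · simp [List.count_eq_zero_of_not_mem hkm, hkm]
    · have hne : r.1 ≠ p.1 := ne_of_lt (hlt p h)
      rw [ih hpw' p h hnd]
      simp [beq_iff_eq, hne]

-- the counts dict: counts[i] = sum over query kmers of position i's multiplicity in index[kmer]
theorem pv_counts_getD (index : PySem.Dict String (List Int)) (qset : List String) (i : Int) :
    ∀ c : PySem.Dict Int Int,
      (qset.foldl (fun c kmer => (index.getD kmer []).foldl (fun c i => c.modify i 0 (· + 1)) c) c).getD i 0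
        = c.getD i 0 + (qset.map (fun km => (((index.getD km []).count i : Nat) : Int))).sum := by
  induction qset with
  | nil => simp
  | cons x t ih =>
    intro c
    rw [List.foldl_cons, ih, PySem.Dict.getD_foldl_modify_add_one, List.map_cons, List.sum_cons]
    ring

-- core value fact: for an enumerated ref with duplicate-free set, counts[i] is A's score
theorem pv_counts_score (mibig_vecs : List (String × List String)) (qset : List String)
    (p : Int × (String × List String)) (hp : p ∈ PySem.List.enumerate mibig_vecs)
    (hnd : p.2.2.Nodup) :
    (pvCounts (pvIndex mibig_vecs) qset).getD p.1 0 = pvScore qset p.2.2 := by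
  unfold pvCounts
  rw [pv_counts_getD, PySem.Dict.getD_empty, zero_add]
  have hmap : qset.map (fun km => ((((pvIndex mibig_vecs).getD km []).count p.1 : Nat) : Int))
      = qset.map (fun km => if p.2.2.contains km then (1 : Int) else 0) := by
    apply List.map_congr_left
    intro km _
    unfold pvIndex
    rw [pv_idx_getD, PySem.Dict.getD_empty, List.nil_append,
      pv_flat_count km _ (PySem.List.pairwise_lt_enumerate mibig_vecs 0) p hp hnd]
    cases h : p.2.2.contains km
    · simp
    · simp
  rw [hmap, PySem.List.sum_map_ite_one_zero]
  rfl

-- membership in one index bucket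
theorem pv_mem_idx (mibig_vecs : List (String × List String)) (k : String) (i : Int) :
    i ∈ (pvIndex mibig_vecs).getD k []
      ↔ ∃ p ∈ PySem.List.enumerate mibig_vecs, p.1 = i ∧ k ∈ p.2.2 := by
  unfold pvIndex
  rw [pv_idx_getD, PySem.Dict.getD_empty, List.nil_append, List.mem_flatMap]
  constructor
  · rintro ⟨p, hp, hrep⟩
    have := List.eq_of_mem_replicate hrep
    refine ⟨p, hp, this.symm, ?_⟩
    rcases List.mem_replicate.mp hrep with ⟨hne, _⟩
    exact List.count_pos_iff.mp (Nat.pos_of_ne_zero hne)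
  · rintro ⟨p, hp, hi, hk⟩
    refine ⟨p, hp, ?_⟩
    rw [List.mem_replicate]
    exact ⟨(List.count_pos_iff.mpr hk).ne', hi.symm⟩

-- the counts keys are exactly the first-hit-ordered distinct positions of all hits
theorem pv_counts_keys (index : PySem.Dict String (List Int)) (qset : List String) :
    (pvCounts index qset).keys
      = PySem.Set.ofList (qset.flatMap (fun km => index.getD km [])) := by
  unfold pvCounts
  rw [PySem.Set.ofList_eq_foldl]
  have h : ∀ (c : PySem.Dict Int Int),
      (qset.foldl (fun c kmer => (index.getD kmer []).foldl (fun c i => c.modify i 0 (· + 1)) c) c).keys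
        = PySem.Set.update c.keys (qset.flatMap (fun km => index.getD km [])) := by
    induction qset with
    | nil => intro c; simp [PySem.Set.update]
    | cons x t ih =>
      intro c
      rw [List.foldl_cons, ih, List.flatMap_cons]
      rw [PySem.Dict.keys_foldl_modify (f := fun _ _ v => v + 1)]
      simp [PySem.Set.update, List.foldl_append]
  rw [h PySem.Dict.empty]
  simp [PySem.Set.update, PySem.Dict.keys_empty]

-- ===== the candidate list =====

-- pred: the query shares at least one kmer with this enumerated ref
theorem pv_mem_counts_keys (mibig_vecs : List (String × List String)) (qset : List String) (i : Int) :
    i ∈ (pvCounts (pvIndex mibig_vecs) qset).keys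
      ↔ ∃ p ∈ PySem.List.enumerate mibig_vecs,
          (qset.any (fun km => p.2.2.contains km)) = true ∧ p.1 = i := by
  rw [pv_counts_keys, PySem.Set.mem_ofList, List.mem_flatMap]
  constructor
  · rintro ⟨km, hkm, hmem⟩
    rcases (pv_mem_idx mibig_vecs km i).mp hmem with ⟨p, hp, hi, hk⟩
    exact ⟨p, hp, List.any_eq_true.mpr ⟨km, hkm, by simpa using hk⟩, hi⟩
  · rintro ⟨p, hp, hany, hi⟩
    rcases List.any_eq_true.mp hany with ⟨km, hkm, hc⟩
    exact ⟨km, hkm, (pv_mem_idx mibig_vecs km i).mpr ⟨p, hp, hi, by simpa using hc⟩⟩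

-- sorted(counts) is exactly the positions of the refs sharing a kmer with the query, in ref order
theorem pv_sorted_keys (mibig_vecs : List (String × List String)) (qset : List String) :
    PySem.List.sorted (pvCounts (pvIndex mibig_vecs) qset).keys (fun i => i)
      = ((PySem.List.enumerate mibig_vecs).filter
          (fun p => qset.any (fun km => p.2.2.contains km))).map (·.1) := by
  apply PySem.List.sorted_eq_of_perm_of_pairwise_lt
  · -- permutation: both are duplicate-free with the same members
    have hpwf : (((PySem.List.enumerate mibig_vecs).filter
        (fun p => qset.any (fun km => p.2.2.contains km))).map (·.1)).Pairwise (· < ·) := by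
      rw [List.pairwise_map]
      exact (PySem.List.pairwise_lt_enumerate mibig_vecs 0).sublist List.filter_sublist
    have hnd1 : (((PySem.List.enumerate mibig_vecs).filter
        (fun p => qset.any (fun km => p.2.2.contains km))).map (·.1)).Nodup :=
      hpwf.imp ne_of_lt
    have hnd2 : ((pvCounts (pvIndex mibig_vecs) qset).keys).Nodup := by
      rw [pv_counts_keys]; exact PySem.Set.nodup_ofList _
    rw [List.perm_ext_iff_of_nodup hnd1 hnd2]
    intro i
    rw [pv_mem_counts_keys, List.mem_map]
    constructor
    · rintro ⟨p, hp, hi⟩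
      rcases List.mem_filter.mp hp with ⟨hpe, hpred⟩
      exact ⟨p, hpe, hpred, hi⟩
    · rintro ⟨p, hpe, hpred, hi⟩
      exact ⟨p, List.mem_filter.mpr ⟨hpe, hpred⟩, hi⟩
  · rw [List.pairwise_map]
    exact (PySem.List.pairwise_lt_enumerate mibig_vecs 0).sublist List.filter_sublist

-- a fold over enumerate ignoring the counter is a fold over the list
theorem pv_foldl_enumerate {α β : Type} (f : β → α → β) (xs : List α) :
    ∀ (s : Int) (init : β),
      (PySem.List.enumerate xs s).foldl (fun b p => f b p.2) init = xs.foldl f init := by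
  induction xs with
  | nil => intro s init; simp [PySem.List.enumerate_nil]
  | cons x t ih =>
    intro s init
    rw [PySem.List.enumerate_cons, List.foldl_cons, List.foldl_cons, ih]

-- refs sharing nothing with the query never change A's running best (its score stays ≥ 0)
theorem pv_skip (qset : List String) :
    ∀ (l : List (Int × (String × List String))) (b : Int × String), 0 ≤ b.1 →
      l.foldl (fun b p => if pvScore qset p.2.2 > b.1 then (pvScore qset p.2.2, p.2.1) else b) b
        = (l.filter (fun p => qset.any (fun km => p.2.2.contains km))).foldl
            (fun b p => if pvScore qset p.2.2 > b.1 then (pvScore qset p.2.2, p.2.1) else b) b := by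
  intro l
  induction l with
  | nil => intro b _; rfl
  | cons p t ih =>
    intro b hb
    rw [List.foldl_cons]
    cases hpred : qset.any (fun km => p.2.2.contains km)
    · have h0 : pvScore qset p.2.2 = 0 := pv_score_eq_zero _ _ hpred
      rw [show List.filter (fun p => qset.any fun km => p.2.2.contains km) (p :: t)
            = List.filter (fun p => qset.any fun km => p.2.2.contains km) t
          from List.filter_cons_of_neg (by rw [hpred]; simp)]
      have hlt : ¬ pvScore qset p.2.2 > b.1 := by rw [h0]; omega
      simp only [if_neg hlt]
      exact ih b hb
    · rw [show List.filter (fun p => qset.any fun km => p.2.2.contains km) (p :: t)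
            = p :: List.filter (fun p => qset.any fun km => p.2.2.contains km) t
          from List.filter_cons_of_pos hpred, List.foldl_cons]
      by_cases hgt : pvScore qset p.2.2 > b.1
      · simp only [if_pos hgt]
        exact ih _ (pv_score_nonneg qset p.2.2)
      · simp only [if_neg hgt]
        exact ih b hb

-- position lookups: an enumerated pair's position retrieves its own ref name
theorem pv_refs_at (mibig_vecs : List (String × List String))
    (p : Int × (String × List String)) (hp : p ∈ PySem.List.enumerate mibig_vecs) :
    PySem.List.pyGetD (mibig_vecs.map (·.1)) p.1 "" = p.2.1 := by
  rcases (PySem.List.mem_enumerate_iff _ _ _).mp hp with ⟨k, hk, hpk⟩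
  subst hpk
  have h0 : ((0 : Int) + k) = (k : Int) := by ring
  rw [h0, PySem.List.pyGetD_natCast]
  simp [List.getD, hk]

-- the per-bgc best-hit scan of A equals B's candidate scan
theorem pv_best_eq (mibig_vecs : List (String × List String))
    (hsets : ∀ r ∈ mibig_vecs, r.2.Nodup) (qset : List String) :
    mibig_vecs.foldl (fun best ref =>
        let current_score := PySem.Set.len (PySem.Set.inter qset ref.2)
        if current_score > best.1 then (current_score, ref.1) else best) ((0 : Int), "initial")
      = pvBest (mibig_vecs.map (·.1)) (pvCounts (pvIndex mibig_vecs) qset) := by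
  unfold pvBest
  rw [pv_sorted_keys]
  -- A side: rewrite scores, lift to enumerate, drop the no-overlap refs
  have hA : mibig_vecs.foldl (fun best ref =>
        let current_score := PySem.Set.len (PySem.Set.inter qset ref.2)
        if current_score > best.1 then (current_score, ref.1) else best) ((0 : Int), "initial")
      = mibig_vecs.foldl (fun b r => if pvScore qset r.2 > b.1 then (pvScore qset r.2, r.1) else b)
          ((0 : Int), "initial") := by
    apply PySem.List.foldl_congr_mem
    intro acc r _
    simp only [pv_len_inter]
  rw [hA, ← pv_foldl_enumerate
      (fun b r => if pvScore qset r.2 > b.1 then (pvScore qset r.2, r.1) else b) mibig_vecs 0,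
    pv_skip qset _ _ (le_refl 0)]
  -- B side: fold over the mapped positions is a fold over the filtered enumerated pairs
  rw [List.foldl_map]
  apply PySem.List.foldl_congr_mem
  intro acc p hp
  have hpe : p ∈ PySem.List.enumerate mibig_vecs := List.mem_filter.mp hp |>.1
  have hmem : p.2 ∈ mibig_vecs := by
    have := PySem.List.map_snd_enumerate mibig_vecs 0
    exact this ▸ List.mem_map_of_mem hpe
  rw [pv_counts_score mibig_vecs qset p hpe (hsets p.2 hmem), pv_refs_at mibig_vecs p hpe]

-- ===== VERDICT (by name: the statement is the Claim_ definition above) =====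
theorem get_polymer_matches_spec : Claim_equal_get_polymer_matches := by
  intro polymer_dict mibig_vecs _hdom hpre
  obtain ⟨_hpd, _hbgcs, _hk, hsets⟩ := hpre
  show _ = _
  unfold get_polymer_matches get_polymer_matches_alt
  congr 1
  apply PySem.List.foldl_congr_mem
  intro tm genome _hg
  apply PySem.List.foldl_congr_mem
  intro tm' bgc _hb
  simp only
  rw [pv_best_eq mibig_vecs hsets bgc.2]
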